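-- pv_equiv track=rewrite | github.com/Extrieve/HackerRank-Python | double_strings.py | d_string1
-- ===== SOURCE A (Python) =====
-- def d_string1(strings, length):
--     mymap = {}
--     for i in range(length):
--         for j in range(length):
--             if strings[i] + strings[j] not in mymap:
--                 mymap[strings[i] + strings[j]] = True
--             # elif strings[j] + strings[i] not in mymap:
--             #     mymap[strings[j] + strings[i]] = True
--             else:
--                 continue
--
--     output = []
--     for string in strings:
--         flag = False
--         if string in mymap:
--             flag = True
--         output.append('0') if not flag else output.append('1')
--
--     return ''.join(output)
-- ===== SOURCE B (Python) =====
-- def d_string1(strings, length):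
--     pool = {strings[i] for i in range(length)}
--     def splittable(s):
--         return any(s[:k] in pool and s[k:] in pool for k in range(len(s) + 1))
--     return ''.join('1' if splittable(s) else '0' for s in strings)
-- ===== Notes on version B (the rewrite author's own statement) =====
-- stated objective: faster
-- what changed: Instead of inserting all length^2 pairwise concatenations into a dict, B builds a hash set of the first `length` strings once and, for each string, tests every split point for both halves being in the set.
import Mathlib
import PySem

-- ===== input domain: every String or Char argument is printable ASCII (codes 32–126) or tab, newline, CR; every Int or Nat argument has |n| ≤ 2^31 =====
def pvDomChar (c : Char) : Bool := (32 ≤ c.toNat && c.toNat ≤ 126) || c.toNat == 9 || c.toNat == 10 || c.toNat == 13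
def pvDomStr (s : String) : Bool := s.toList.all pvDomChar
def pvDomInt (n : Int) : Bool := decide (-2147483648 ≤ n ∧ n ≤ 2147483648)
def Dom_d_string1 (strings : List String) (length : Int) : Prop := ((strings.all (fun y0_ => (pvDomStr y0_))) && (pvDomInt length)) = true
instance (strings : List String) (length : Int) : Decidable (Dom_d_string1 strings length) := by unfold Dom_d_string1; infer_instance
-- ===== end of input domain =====

-- B replaces A's dict of all length^2 pairwise concatenations by a set of the list's
-- first `length` strings plus a split-point scan per string (objective: faster).

-- ===== PORT A =====
def d_string1 (strings : List String) (length : Int) : String :=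
  let mymap : PySem.Dict String Bool :=
    (PySem.List.pyRange 0 length 1).foldl (fun d i =>
      (PySem.List.pyRange 0 length 1).foldl (fun d j =>
        if ¬ d.contains (PySem.List.pyGetD strings i "" ++ PySem.List.pyGetD strings j "") then
          d.insert (PySem.List.pyGetD strings i "" ++ PySem.List.pyGetD strings j "") true
        else d) d) PySem.Dict.empty
  let output : List String := strings.foldl (fun acc s =>
    let flag := mymap.contains s
    acc ++ [if !flag then "0" else "1"]) []
  PySem.Str.join "" output

-- ===== PORT B =====
def d_string1_alt_splittable (pool : PySem.Set String) (s : String) : Bool :=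
  (PySem.List.pyRange 0 (PySem.Str.len s + 1) 1).any (fun k =>
    pool.contains (PySem.Str.slice s none (some k)) &&
    pool.contains (PySem.Str.slice s (some k) none))

def d_string1_alt (strings : List String) (length : Int) : String :=
  let pool : PySem.Set String :=
    PySem.Set.ofList ((PySem.List.pyRange 0 length 1).map (fun i => PySem.List.pyGetD strings i ""))
  PySem.Str.join "" (strings.map (fun s => if d_string1_alt_splittable pool s then "1" else "0"))

-- ===== PRECONDITION & SPEC =====
-- Pre_ excludes exactly the inputs where Python A raises IndexError: length > len(strings)
-- (both programs index strings[i] for i in range(length)).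
def Pre_d_string1 (strings : List String) (length : Int) : Prop := length ≤ (strings.length : Int)
instance (strings : List String) (length : Int) : Decidable (Pre_d_string1 strings length) := by unfold Pre_d_string1; infer_instance
def pvWitness_d_string1 : List String × Int := (["ab", "a", "b"], 3)

def Spec_d_string1 (strings : List String) (length : Int) (out : String) : Prop := out = d_string1_alt strings length
instance (strings : List String) (length : Int) (out : String) : Decidable (Spec_d_string1 strings length out) := by unfold Spec_d_string1; infer_instance

-- ===== CLAIM (what is proved, stated in full; the proofs are below) =====
def Claim_equal_d_string1 : Prop := ∀ (strings : List String) (length : Int), Dom_d_string1 strings length → Pre_d_string1 strings length → Spec_d_string1 strings length (d_string1 strings length)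

-- ===== LEMMAS AND PROOFS =====

-- one pass of A's conditional-insert loop only ever grows the key set by the keys it sees
lemma condInsert_contains (kf : Int → String) (s : String) :
    ∀ (l : List Int) (d : PySem.Dict String Bool),
    (l.foldl (fun d j => if ¬ d.contains (kf j) then d.insert (kf j) true else d) d).contains s
      = (d.contains s || l.any (fun j => kf j == s)) := by
  intro l
  induction l with
  | nil => intro d; simp
  | cons a t ih =>
    intro d
    simp only [List.foldl_cons, List.any_cons]
    by_cases h : d.contains (kf a)
    · rw [if_neg (by simp [h]), ih]
      by_cases hs : kf a = s
      · subst hs; simp [h]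
      · simp [beq_eq_false_iff_ne.mpr hs]
    · rw [if_pos (by simp [h]), ih, PySem.Dict.contains_insert]
      by_cases hs : kf a = s
      · subst hs; simp
      · simp [beq_eq_false_iff_ne.mpr hs, beq_eq_false_iff_ne.mpr (Ne.symm hs)]

lemma nested_contains (kf : Int → Int → String) (s : String) (M : List Int) :
    ∀ (L : List Int) (d : PySem.Dict String Bool),
    (L.foldl (fun d i =>
        M.foldl (fun d j => if ¬ d.contains (kf i j) then d.insert (kf i j) true else d) d) d).contains s
      = (d.contains s || L.any (fun i => M.any (fun j => kf i j == s))) := by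
  intro L
  induction L with
  | nil => intro d; simp
  | cons a t ih =>
    intro d
    simp only [List.foldl_cons, List.any_cons]
    rw [ih, condInsert_contains]
    rw [Bool.or_assoc]

-- the heart: s is some pair-concatenation of first-`length` strings iff some split point
-- puts both halves in the pool
lemma bit_eq (strings : List String) (length : Int) (s : String) :
    (PySem.List.pyRange 0 length 1).any (fun i => (PySem.List.pyRange 0 length 1).any (fun j =>
        PySem.List.pyGetD strings i "" ++ PySem.List.pyGetD strings j "" == s))
      = d_string1_alt_splittable
          (PySem.Set.ofList ((PySem.List.pyRange 0 length 1).map (fun i => PySem.List.pyGetD strings i ""))) s := by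
  unfold d_string1_alt_splittable
  rcases Bool.eq_false_or_eq_true ((PySem.List.pyRange 0 length 1).any (fun i => (PySem.List.pyRange 0 length 1).any (fun j =>
        PySem.List.pyGetD strings i "" ++ PySem.List.pyGetD strings j "" == s))) with hA | hA
  · -- A-side true → B-side true
    rw [hA]
    symm
    rw [List.any_eq_true] at hA ⊢
    obtain ⟨i, hi, hA⟩ := hA
    rw [List.any_eq_true] at hA
    obtain ⟨j, hj, hA⟩ := hA
    rw [beq_iff_eq] at hA
    refine ⟨((PySem.List.pyGetD strings i "").toList.length : Int), ?_, ?_⟩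
    · rw [PySem.List.mem_pyRange_one]
      constructor
      · exact_mod_cast Nat.zero_le _
      · rw [PySem.Str.len_eq]
        have : (PySem.List.pyGetD strings i "").toList.length ≤ s.toList.length := by
          rw [← hA, String.toList_append, List.length_append]; omega
        omega
    · simp only [Bool.and_eq_true, PySem.Set.contains_iff, PySem.Set.mem_ofList, List.mem_map]
      refine ⟨⟨i, hi, ?_⟩, ⟨j, hj, ?_⟩⟩
      · apply String.toList_inj.mp
        rw [PySem.Str.toList_slice, PySem.Chars.slice_eq_listSlice, PySem.List.slice_to_natCast,
            ← hA, String.toList_append, List.take_left]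
      · apply String.toList_inj.mp
        rw [PySem.Str.toList_slice, PySem.Chars.slice_eq_listSlice, PySem.List.slice_from_natCast,
            ← hA, String.toList_append, List.drop_left]
  · -- A-side false → B-side false
    rw [hA]
    symm
    rw [List.any_eq_false]
    intro k hk
    simp only [Bool.and_eq_true, PySem.Set.contains_iff, PySem.Set.mem_ofList, List.mem_map, not_and]
    rintro ⟨i, hi, hpi⟩ ⟨j, hj, hpj⟩
    rw [List.any_eq_false] at hA
    apply hA i hi
    rw [List.any_eq_true]
    refine ⟨j, hj, ?_⟩
    rw [beq_iff_eq]
    -- prefix ++ suffix = s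
    apply String.toList_inj.mp
    rw [String.toList_append, hpi, hpj]
    have hk' := PySem.List.mem_pyRange_one.mp hk
    obtain ⟨k', rfl⟩ : ∃ k' : Nat, (k' : Int) = k := ⟨k.toNat, Int.toNat_of_nonneg hk'.1⟩
    rw [PySem.Str.toList_slice, PySem.Str.toList_slice, PySem.Chars.slice_eq_listSlice,
        PySem.Chars.slice_eq_listSlice, PySem.List.slice_to_natCast, PySem.List.slice_from_natCast,
        List.take_append_drop]

-- ===== VERDICT (by name: the statement is the Claim_ definition above) =====
theorem d_string1_spec : Claim_equal_d_string1 := by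
  intro strings length _ _
  unfold Spec_d_string1 d_string1 d_string1_alt
  dsimp only
  congr 1
  rw [PySem.List.foldl_append_singleton_eq_map, List.nil_append]
  apply List.map_congr_left
  intro s _
  rw [nested_contains (fun i j => PySem.List.pyGetD strings i "" ++ PySem.List.pyGetD strings j "") s,
      PySem.Dict.contains_empty, Bool.false_or, bit_eq]
  rcases Bool.eq_false_or_eq_true (d_string1_alt_splittable
      (PySem.Set.ofList ((PySem.List.pyRange 0 length 1).map (fun i => PySem.List.pyGetD strings i ""))) s) with h | h <;>
    simp [h]
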